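-- pv_equiv track=rewrite | github.com/winrid/dirtforever | scripts/merge_probes.py | track_to_block
-- ===== SOURCE A (Python) =====
-- from typing import Optional, Dict, List, Tuple
--
-- def track_to_block(tid: int) -> Optional[int]:
--     """Determine which block a track belonged to in the (wrong) original enum."""
--     # From the hand-compiled BLOCKS in build_batch3.py + memory of enum layout
--     tables = {
--         2:  {462, 464, 467, 469},
--         3:  {437, 439, 441, 442, 443, 446, 448},
--         5:  {472, 480, 490, 496},
--         10: {478},
--         13: {511, 512, 515, 516},
--         14: {519, 520, 527, 528},
--         16: {568, 569, 584, 585, 586, 587, 588, 589, 590, 591, 592, 593},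
--         17: {572, 573, 604, 605, 606, 607, 608, 609, 610, 611, 612, 613},
--         19: {537},
--         20: {538},
--         31: {566, 574, 575, 576, 577, 578, 579, 580, 581, 582, 583},
--         34: {570, 571, 594, 595, 597, 598, 599, 600, 601, 602, 603, 596},
--         36: {614, 615, 616, 617, 620, 621, 622, 623, 624, 625},
--         37: {626, 627, 628, 629, 630, 631, 632, 633, 634, 635, 636, 637},
--         46: {659, 661, 663, 667},
--     }
--     for block, ids in tables.items():
--         if tid in ids:
--             return block
--     return None
-- ===== SOURCE B (Python) =====
-- from typing import Optional
--
-- # The track ids, compressed into maximal contiguous runs (lo, hi, block),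
-- # sorted by lo. Lookup is a binary search for the last run starting at or
-- # below tid, followed by a single upper-bound check.
-- _RUNS = [
--     (437, 437, 3), (439, 439, 3), (441, 443, 3), (446, 446, 3), (448, 448, 3),
--     (462, 462, 2), (464, 464, 2), (467, 467, 2), (469, 469, 2),
--     (472, 472, 5), (478, 478, 10), (480, 480, 5), (490, 490, 5), (496, 496, 5),
--     (511, 512, 13), (515, 516, 13),
--     (519, 520, 14), (527, 528, 14),
--     (537, 537, 19), (538, 538, 20),
--     (566, 566, 31), (568, 569, 16), (570, 571, 34), (572, 573, 17),
--     (574, 583, 31), (584, 593, 16), (594, 603, 34), (604, 613, 17),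
--     (614, 617, 36), (620, 625, 36), (626, 637, 37),
--     (659, 659, 46), (661, 661, 46), (663, 663, 46), (667, 667, 46),
-- ]
--
--
-- def track_to_block(tid: int) -> Optional[int]:
--     """Determine which block a track belonged to in the (wrong) original enum."""
--     lo, hi = 0, len(_RUNS)
--     while lo < hi:
--         mid = (lo + hi) // 2
--         if _RUNS[mid][0] <= tid:
--             lo = mid + 1
--         else:
--             hi = mid
--     if lo == 0:
--         return None
--     start, end, block = _RUNS[lo - 1]
--     return block if tid <= end else None
-- ===== Notes on version B (the rewrite author's own statement) =====
-- stated objective: alternative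
-- what changed: B compresses the disjoint id sets into a sorted list of contiguous (lo, hi, block) runs and answers each query with a hand-written binary search for the last run starting at or below tid plus one upper-bound check, instead of A's linear scan over every block with a set-membership test.
import Mathlib
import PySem

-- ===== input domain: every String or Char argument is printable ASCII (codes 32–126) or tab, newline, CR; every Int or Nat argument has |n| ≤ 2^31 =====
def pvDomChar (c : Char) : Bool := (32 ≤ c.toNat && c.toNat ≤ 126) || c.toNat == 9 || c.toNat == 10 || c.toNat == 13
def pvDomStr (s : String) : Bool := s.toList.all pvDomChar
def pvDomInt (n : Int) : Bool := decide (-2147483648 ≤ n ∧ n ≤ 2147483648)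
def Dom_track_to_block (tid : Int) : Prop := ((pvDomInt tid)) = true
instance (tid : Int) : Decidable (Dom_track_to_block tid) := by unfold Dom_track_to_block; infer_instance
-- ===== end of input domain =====

-- B compresses the id sets into sorted contiguous (lo, hi, block) runs and binary-searches them, instead of A's scan over every block's set (objective: alternative).

-- ===== PORT A =====
-- A's dict literal `tables`: block number paired with its set of ids (sets as distinct-element lists, in literal order)
def pvTablesA : List (Int × List Int) :=
  [ (2,  [462, 464, 467, 469]),
    (3,  [437, 439, 441, 442, 443, 446, 448]),
    (5,  [472, 480, 490, 496]),
    (10, [478]),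
    (13, [511, 512, 515, 516]),
    (14, [519, 520, 527, 528]),
    (16, [568, 569, 584, 585, 586, 587, 588, 589, 590, 591, 592, 593]),
    (17, [572, 573, 604, 605, 606, 607, 608, 609, 610, 611, 612, 613]),
    (19, [537]),
    (20, [538]),
    (31, [566, 574, 575, 576, 577, 578, 579, 580, 581, 582, 583]),
    (34, [570, 571, 594, 595, 597, 598, 599, 600, 601, 602, 603, 596]),
    (36, [614, 615, 616, 617, 620, 621, 622, 623, 624, 625]),
    (37, [626, 627, 628, 629, 630, 631, 632, 633, 634, 635, 636, 637]),
    (46, [659, 661, 663, 667]) ]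

-- A's `for block, ids in tables.items(): if tid in ids: return block` loop
def pvLoopA (tid : Int) : List (Int × List Int) → Option Int
  | [] => none
  | (block, ids) :: rest => if ids.contains tid then some block else pvLoopA tid rest

def track_to_block (tid : Int) : Option Int :=
  pvLoopA tid pvTablesA

-- ===== PORT B =====
-- Source B's `_RUNS`: maximal contiguous id runs (lo, hi, block), sorted by lo
def pvRuns : List (Int × Int × Int) :=
  [ (437, 437, 3), (439, 439, 3), (441, 443, 3), (446, 446, 3), (448, 448, 3),
    (462, 462, 2), (464, 464, 2), (467, 467, 2), (469, 469, 2),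
    (472, 472, 5), (478, 478, 10), (480, 480, 5), (490, 490, 5), (496, 496, 5),
    (511, 512, 13), (515, 516, 13),
    (519, 520, 14), (527, 528, 14),
    (537, 537, 19), (538, 538, 20),
    (566, 566, 31), (568, 569, 16), (570, 571, 34), (572, 573, 17),
    (574, 583, 31), (584, 593, 16), (594, 603, 34), (604, 613, 17),
    (614, 617, 36), (620, 625, 36), (626, 637, 37),
    (659, 659, 46), (661, 661, 46), (663, 663, 46), (667, 667, 46) ]

-- Source B's `while lo < hi` binary-search loop; fuel only makes the loop total
-- (fuel = list length + 1 always suffices since hi - lo shrinks each step)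
def pvBisect (tid : Int) : Nat → Nat → Nat → Nat
  | 0, lo, _ => lo
  | fuel + 1, lo, hi =>
    if lo < hi then
      let mid := (lo + hi) / 2
      if (pvRuns.getD mid (0, 0, 0)).1 ≤ tid then pvBisect tid fuel (mid + 1) hi
      else pvBisect tid fuel lo mid
    else lo

def track_to_block_alt (tid : Int) : Option Int :=
  let lo := pvBisect tid (pvRuns.length + 1) 0 pvRuns.length
  if lo = 0 then none
  else
    let r := pvRuns.getD (lo - 1) (0, 0, 0)
    if tid ≤ r.2.1 then some r.2.2 else none

-- ===== PRECONDITION & SPEC =====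
def Spec_track_to_block (tid : Int) (out : Option Int) : Prop := out = track_to_block_alt tid
instance (tid : Int) (out : Option Int) : Decidable (Spec_track_to_block tid out) := by unfold Spec_track_to_block; infer_instance

-- ===== CLAIM (what is proved, stated in full; the proofs are below) =====
def Claim_equal_track_to_block : Prop := ∀ (tid : Int), Dom_track_to_block tid → Spec_track_to_block tid (track_to_block tid)

-- ===== LEMMAS AND PROOFS =====

-- the scan returns none when tid is in none of the id sets
theorem pvLoopA_none (tid : Int) (bs : List (Int × List Int))
    (h : ∀ p ∈ bs, ¬ p.2.contains tid) : pvLoopA tid bs = none := by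
  induction bs with
  | nil => rfl
  | cons hd rest ih =>
    obtain ⟨b, ids⟩ := hd
    simp only [pvLoopA, if_neg (h (b, ids) (List.mem_cons_self))]
    exact ih fun p hp => h p (List.mem_cons_of_mem _ hp)

-- A returns none outside the id range [437, 667]
theorem pvA_out (tid : Int) (h : tid < 437 ∨ 667 < tid) : track_to_block tid = none := by
  refine pvLoopA_none tid pvTablesA fun p hp => ?_
  fin_cases hp <;> simp <;> omega

-- B returns none below 437: the binary search returns index 0
theorem pvB_low (tid : Int) (h : tid < 437) : track_to_block_alt tid = none := by
  have h17 : ¬((527:Int) ≤ tid) := by omega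
  have h8  : ¬((469:Int) ≤ tid) := by omega
  have h4  : ¬((448:Int) ≤ tid) := by omega
  have h2  : ¬((441:Int) ≤ tid) := by omega
  have h1  : ¬((439:Int) ≤ tid) := by omega
  have h0  : ¬((437:Int) ≤ tid) := by omega
  simp [track_to_block_alt, pvBisect, pvRuns, h17, h8, h4, h2, h1, h0]

-- B returns none above 667: the search returns 35 and the last run's upper bound fails
theorem pvB_high (tid : Int) (h : 667 < tid) : track_to_block_alt tid = none := by
  have h17 : ((527:Int) ≤ tid) := by omega
  have h26 : ((594:Int) ≤ tid) := by omega
  have h31 : ((659:Int) ≤ tid) := by omega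
  have h33 : ((663:Int) ≤ tid) := by omega
  have h34 : ((667:Int) ≤ tid) := by omega
  have hend : ¬(tid ≤ (667:Int)) := by omega
  simp [track_to_block_alt, pvBisect, pvRuns, h17, h26, h31, h33, h34, hend]

-- exhaustive agreement on the id range
set_option maxRecDepth 4000 in
set_option maxHeartbeats 1000000 in
theorem pvMid : ∀ k : Nat, k < 231 → track_to_block (437 + (k : Int)) = track_to_block_alt (437 + (k : Int)) := by decide

-- ===== VERDICT (by name: the statement is the Claim_ definition above) =====
theorem track_to_block_spec : Claim_equal_track_to_block := by
  intro tid _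
  unfold Spec_track_to_block
  by_cases h : 437 ≤ tid ∧ tid ≤ 667
  · obtain ⟨h1, h2⟩ := h
    have hk : tid = 437 + ((tid - 437).toNat : Int) := by omega
    have hlt : (tid - 437).toNat < 231 := by omega
    rw [hk]
    exact pvMid _ hlt
  · have h' : tid < 437 ∨ 667 < tid := by omega
    rcases h' with h' | h'
    · rw [pvA_out tid (Or.inl h'), pvB_low tid h']
    · rw [pvA_out tid (Or.inr h'), pvB_high tid h']
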